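-- pv_equiv track=rewrite | github.com/ramzialsabarna/Medicare-internal-audit-sysytem | python/validation_code/uvl_to_figure_batch.py | prune_edges_by_depth
-- ===== SOURCE A (Python) =====
-- from collections import deque
--
-- def prune_edges_by_depth(edges, root, max_depth: int):
--     if not root:
--         return edges
--
--     children = {}
--     for p, c in edges:
--         children.setdefault(p, []).append(c)
--
--     keep = set()
--     q = deque([(root, 0)])
--     while q:
--         node, d = q.popleft()
--         if node in keep:
--             continue
--         keep.add(node)
--         if d >= max_depth:
--             continue
--         for ch in children.get(node, []):
--             q.append((ch, d + 1))
--
--     return [(p, c) for (p, c) in edges if p in keep and c in keep]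
-- ===== SOURCE B (Python) =====
-- def prune_edges_by_depth(edges, root, max_depth: int):
--     if not root:
--         return edges
--
--     # Saturation over the raw edge list (no adjacency map, no queue/frontier BFS):
--     # after k rounds keep = {nodes at BFS distance <= k from root}; stop at fixpoint.
--     keep = {root}
--     for _ in range(max_depth):
--         new = {c for p, c in edges if p in keep} - keep
--         if not new:
--             break
--         keep |= new
--
--     return [(p, c) for (p, c) in edges if p in keep and c in keep]
-- ===== Notes on version B (the rewrite author's own statement) =====
-- stated objective: simpler
-- what changed: Replaces adjacency-dict + deque BFS by Bellman-Ford-style saturation directly over the raw edge list: keep starts as {root} and each of max_depth rounds adds every edge target whose source is already kept, stopping at a fixpoint; no children map, no queue, no per-node depth bookkeeping.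
import Mathlib
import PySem

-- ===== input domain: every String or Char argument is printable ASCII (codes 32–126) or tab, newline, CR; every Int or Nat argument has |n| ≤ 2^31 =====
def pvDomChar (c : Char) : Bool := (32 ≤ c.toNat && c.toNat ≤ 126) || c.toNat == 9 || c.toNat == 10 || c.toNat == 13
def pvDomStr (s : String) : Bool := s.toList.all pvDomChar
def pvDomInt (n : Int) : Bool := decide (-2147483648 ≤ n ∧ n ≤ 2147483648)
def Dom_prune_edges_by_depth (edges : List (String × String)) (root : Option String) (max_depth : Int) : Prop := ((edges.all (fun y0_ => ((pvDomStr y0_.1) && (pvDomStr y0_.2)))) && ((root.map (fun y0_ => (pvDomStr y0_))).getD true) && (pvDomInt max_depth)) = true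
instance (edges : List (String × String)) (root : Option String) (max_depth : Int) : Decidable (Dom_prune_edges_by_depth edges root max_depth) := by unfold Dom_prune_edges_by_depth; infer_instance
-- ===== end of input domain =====

-- B replaces A's adjacency-dict + deque BFS by Bellman-Ford-style saturation over the raw edge
-- list (max_depth rounds, fixpoint break); same return value, a simpler alternative structure.

-- ===== PORT A =====
-- children.setdefault(p, []).append(c)  ==  children[p] = children.get(p, []) + [c]  ==  Dict.modify
def pvChildren (edges : List (String × String)) : PySem.Dict String (List String) :=
  edges.foldl (fun d pc => d.modify pc.1 [] (fun l => l ++ [pc.2])) PySem.Dict.empty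

def pvChildGet (children : PySem.Dict String (List String)) (n : String) : List String :=
  children.getD n []

-- the next three lemmas are cited by pvLoopA's decreasing_by, so they stay above the port
theorem pvChildGet_of_not_mem_keys (children : PySem.Dict String (List String)) (n : String)
    (h : n ∉ children.keys) : pvChildGet children n = [] := by
  refine PySem.Dict.getD_of_not_contains _ _ ?_
  rcases hc : children.contains n with _ | _
  · rfl
  · exact absurd ((PySem.Dict.contains_iff_mem_keys _ _).mp hc) h

theorem pv_len_filter_mono (l : List String) (p q : String → Bool)
    (h : ∀ x ∈ l, p x = true → q x = true) :
    (l.filter p).length ≤ (l.filter q).length := by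
  induction l with
  | nil => simp
  | cons a t ih =>
    have iht := ih (fun x hx => h x (List.mem_cons_of_mem _ hx))
    have ha := h a (List.mem_cons_self ..)
    simp only [List.filter_cons]
    rcases hp : p a with _ | _ <;> rcases hq : q a with _ | _ <;> simp_all <;> omega

theorem pv_len_filter_lt (l : List String) (p q : String → Bool) (n : String) (hn : n ∈ l)
    (h : ∀ x ∈ l, p x = true → q x = true) (hpn : p n = false) (hqn : q n = true) :
    (l.filter p).length < (l.filter q).length := by
  induction l with
  | nil => cases hn
  | cons a t ih =>
    have hmono := pv_len_filter_mono t p q (fun x hx => h x (List.mem_cons_of_mem _ hx))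
    simp only [List.filter_cons]
    rcases List.mem_cons.mp hn with rfl | ht
    · rw [hpn, hqn]; simp; omega
    · have hlt := ih ht (fun x hx => h x (List.mem_cons_of_mem _ hx))
      rcases hp : p a with _ | _ <;> rcases hq : q a with _ | _ <;> simp_all <;> omega

def pvLoopA (children : PySem.Dict String (List String)) (md : Int) :
    PySem.Set String → List (String × Int) → PySem.Set String
  | keep, [] => keep
  | keep, (n, d) :: rest =>
    if hmem : PySem.Set.contains keep n then
      pvLoopA children md keep rest
    else
      pvLoopA children md (PySem.Set.add keep n)
        (rest ++ (if md ≤ d then [] else (pvChildGet children n).map (fun c => (c, d + 1))))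
  termination_by keep q =>
    (((children.keys).filter (fun x => !(PySem.Set.contains keep x))).length, q.length)
  decreasing_by
  · exact Prod.Lex.right _ (by simp)
  · by_cases hn : n ∈ children.keys
    · apply Prod.Lex.left
      apply pv_len_filter_lt _ _ _ n hn
      · intro x hx hb
        rw [Bool.not_eq_true'] at hb ⊢
        rcases hck : PySem.Set.contains keep x with _ | _
        · rfl
        · have : PySem.Set.contains (PySem.Set.add keep n) x = true :=
            (PySem.Set.contains_iff _ _).mpr
              ((PySem.Set.mem_add _ _ _).mpr (Or.inl ((PySem.Set.contains_iff _ _).mp hck)))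
          rw [this] at hb; cases hb
      · have : PySem.Set.contains (PySem.Set.add keep n) n = true :=
          (PySem.Set.contains_iff _ _).mpr ((PySem.Set.mem_add _ _ _).mpr (Or.inr rfl))
        simp [this]
      · simp [Bool.not_eq_true'] at hmem ⊢
        exact hmem
    · have heq : (children.keys).filter (fun x => !(PySem.Set.contains (PySem.Set.add keep n) x))
          = (children.keys).filter (fun x => !(PySem.Set.contains keep x)) := by
        refine List.filter_congr (fun x hx => ?_)
        have hxn : x ≠ n := fun e => hn (e ▸ hx)
        congr 1
        rw [Bool.eq_iff_iff]
        simp [PySem.Set.contains_iff, PySem.Set.mem_add, hxn]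
      rw [heq]
      apply Prod.Lex.right
      simp [pvChildGet_of_not_mem_keys children n hn]

def prune_edges_by_depth (edges : List (String × String)) (root : Option String) (max_depth : Int) : List (String × String) :=
  match root with
  | none => edges
  | some r =>
    if r = "" then edges
    else
      let children := pvChildren edges
      let keep := pvLoopA children max_depth PySem.Set.empty [(r, 0)]
      edges.filter (fun pc => PySem.Set.contains keep pc.1 && PySem.Set.contains keep pc.2)

-- ===== PORT B =====
-- new = {c for p, c in edges if p in keep} - keep
def pvNewB (edges : List (String × String)) (keep : PySem.Set String) : PySem.Set String :=
  PySem.Set.diff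
    (PySem.Set.ofList ((edges.filter (fun pc => PySem.Set.contains keep pc.1)).map Prod.snd))
    keep

-- for _ in range(max_depth): … if not new: break; keep |= new
def pvLoopB (edges : List (String × String)) : PySem.Set String → Nat → PySem.Set String
  | keep, 0 => keep
  | keep, k + 1 =>
    let nw := pvNewB edges keep
    if nw.isEmpty then keep
    else pvLoopB edges (PySem.Set.union keep nw) k

def prune_edges_by_depth_alt (edges : List (String × String)) (root : Option String) (max_depth : Int) : List (String × String) :=
  match root with
  | none => edges
  | some r =>
    if r = "" then edges
    else
      let keep := pvLoopB edges (PySem.Set.add PySem.Set.empty r) max_depth.toNat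
      edges.filter (fun pc => PySem.Set.contains keep pc.1 && PySem.Set.contains keep pc.2)

-- ===== PRECONDITION & SPEC =====
def Spec_prune_edges_by_depth (edges : List (String × String)) (root : Option String) (max_depth : Int) (out : List (String × String)) : Prop := out = prune_edges_by_depth_alt edges root max_depth
instance (edges : List (String × String)) (root : Option String) (max_depth : Int) (out : List (String × String)) : Decidable (Spec_prune_edges_by_depth edges root max_depth out) := by unfold Spec_prune_edges_by_depth; infer_instance

-- ===== CLAIM (what is proved, stated in full; the proofs are below) =====
def Claim_equal_prune_edges_by_depth : Prop := ∀ (edges : List (String × String)) (root : Option String) (max_depth : Int), Dom_prune_edges_by_depth edges root max_depth → Spec_prune_edges_by_depth edges root max_depth (prune_edges_by_depth edges root max_depth)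

-- ===== LEMMAS AND PROOFS =====

-- pvSeg keep F: fold F over keep, adding unseen elements and recording them in order
def pvSeg (keep : PySem.Set String) (F : List String) : PySem.Set String × List String :=
  F.foldl
    (fun s x => if PySem.Set.contains s.1 x then s else (PySem.Set.add s.1 x, s.2 ++ [x]))
    (keep, [])

-- reference level-by-level recursion for A's BFS
def pvLA (children : PySem.Dict String (List String)) :
    PySem.Set String → List String → Nat → PySem.Set String
  | keep, F, 0 => (pvSeg keep F).1
  | keep, F, k + 1 =>
    pvLA children (pvSeg keep F).1 (((pvSeg keep F).2).flatMap (pvChildGet children)) k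

-- one step / k steps of the abstract "successors" operator
def pvTrans (edges : List (String × String)) (S : String → Prop) : String → Prop :=
  fun x => S x ∨ ∃ p, S p ∧ (p, x) ∈ edges

def pvSat (edges : List (String × String)) : Nat → (String → Prop) → (String → Prop)
  | 0, S => S
  | k + 1, S => pvSat edges k (pvTrans edges S)

theorem pvSeg_shift (F : List String) (keep : PySem.Set String) (a : List String) :
    F.foldl
      (fun s x => if PySem.Set.contains s.1 x then s else (PySem.Set.add s.1 x, s.2 ++ [x]))
      (keep, a)
    = ((pvSeg keep F).1, a ++ (pvSeg keep F).2) := by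
  induction F generalizing keep a with
  | nil => simp [pvSeg]
  | cons n F ih =>
    simp only [pvSeg, List.foldl_cons]
    rcases hc : PySem.Set.contains keep n with _ | _
    · simp only [hc, Bool.false_eq_true, if_false]
      rw [ih, ih]
      simp
    · simp only [hc, if_true]
      exact ih keep a

theorem pvSeg_cons_mem {keep : PySem.Set String} {n : String}
    (h : PySem.Set.contains keep n = true) (F : List String) :
    pvSeg keep (n :: F) = pvSeg keep F := by
  have hm : n ∈ keep := (PySem.Set.contains_iff _ _).mp h
  simp [pvSeg, hm]

theorem pvSeg_cons_new {keep : PySem.Set String} {n : String}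
    (h : PySem.Set.contains keep n = false) (F : List String) :
    pvSeg keep (n :: F)
      = ((pvSeg (PySem.Set.add keep n) F).1, n :: (pvSeg (PySem.Set.add keep n) F).2) := by
  have hm : n ∉ keep := by simpa using h
  have h1 : pvSeg keep (n :: F)
      = F.foldl
          (fun s x => if PySem.Set.contains s.1 x then s else (PySem.Set.add s.1 x, s.2 ++ [x]))
          (PySem.Set.add keep n, [n]) := by
    simp [pvSeg, hm]
  rw [h1, pvSeg_shift F (PySem.Set.add keep n) [n]]
  simp

theorem mem_pvSeg_fst (F : List String) (keep : PySem.Set String) (x : String) :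
    x ∈ (pvSeg keep F).1 ↔ x ∈ keep ∨ x ∈ F := by
  induction F generalizing keep with
  | nil => simp [pvSeg]
  | cons n F ih =>
    rcases hc : PySem.Set.contains keep n with _ | _
    · rw [pvSeg_cons_new hc]
      have hmem := ih (PySem.Set.add keep n)
      simp only [hmem, PySem.Set.mem_add, List.mem_cons]
      tauto
    · rw [pvSeg_cons_mem hc]
      have hn : n ∈ keep := (PySem.Set.contains_iff _ _).mp hc
      rw [ih keep]
      simp only [List.mem_cons]
      constructor
      · tauto
      · rintro (h | rfl | h) <;> tauto
  
theorem mem_pvSeg_snd (F : List String) (keep : PySem.Set String) (x : String) :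
    x ∈ (pvSeg keep F).2 ↔ x ∈ F ∧ x ∉ keep := by
  induction F generalizing keep with
  | nil => simp [pvSeg]
  | cons n F ih =>
    rcases hc : PySem.Set.contains keep n with _ | _
    · rw [pvSeg_cons_new hc]
      have hn : n ∉ keep := by simpa using hc
      have hmem := ih (PySem.Set.add keep n)
      simp only [List.mem_cons, hmem, PySem.Set.mem_add]
      constructor
      · rintro (rfl | ⟨hF, hne⟩)
        · exact ⟨Or.inl rfl, hn⟩
        · exact ⟨Or.inr hF, fun hk => hne (Or.inl hk)⟩
      · rintro ⟨rfl | hF, hnk⟩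
        · exact Or.inl rfl
        · by_cases hxn : x = n
          · exact Or.inl hxn
          · exact Or.inr ⟨hF, by rintro (h | h) <;> [exact hnk h; exact hxn h]⟩
    · rw [pvSeg_cons_mem hc]
      have hn : n ∈ keep := (PySem.Set.contains_iff _ _).mp hc
      rw [ih keep]
      simp only [List.mem_cons]
      constructor
      · tauto
      · rintro ⟨rfl | hF, hnk⟩
        · exact absurd hn hnk
        · exact ⟨hF, hnk⟩

theorem pvLoopA_nil (children : PySem.Dict String (List String)) (md : Int)
    (keep : PySem.Set String) : pvLoopA children md keep [] = keep := by
  rw [pvLoopA]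

theorem pvLoopA_cons_mem (children : PySem.Dict String (List String)) (md : Int)
    (keep : PySem.Set String) (n : String) (d : Int) (rest : List (String × Int))
    (h : PySem.Set.contains keep n = true) :
    pvLoopA children md keep ((n, d) :: rest) = pvLoopA children md keep rest := by
  have hm : n ∈ keep := (PySem.Set.contains_iff _ _).mp h
  rw [pvLoopA]; simp [hm]

theorem pvLoopA_cons_new (children : PySem.Dict String (List String)) (md : Int)
    (keep : PySem.Set String) (n : String) (d : Int) (rest : List (String × Int))
    (h : PySem.Set.contains keep n = false) :
    pvLoopA children md keep ((n, d) :: rest)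
      = pvLoopA children md (PySem.Set.add keep n)
          (rest ++ (if md ≤ d then [] else (pvChildGet children n).map (fun c => (c, d + 1)))) := by
  have hm : n ∉ keep := by simpa using h
  rw [pvLoopA]; simp [hm]

-- once the depth has reached max_depth, A only absorbs the remaining level into keep
theorem pvLoopA_tail (children : PySem.Dict String (List String)) (md : Int) (d : Int)
    (hd : md ≤ d) (F : List String) (keep : PySem.Set String) :
    pvLoopA children md keep (F.map (fun n => (n, d))) = (pvSeg keep F).1 := by
  induction F generalizing keep with
  | nil => simp [pvLoopA_nil, pvSeg]
  | cons n F ih =>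
    simp only [List.map_cons]
    rcases hc : PySem.Set.contains keep n with _ | _
    · rw [pvLoopA_cons_new children md keep n d _ hc, if_pos hd, List.append_nil,
        pvSeg_cons_new hc]
      exact ih (PySem.Set.add keep n)
    · rw [pvLoopA_cons_mem children md keep n d _ hc, pvSeg_cons_mem hc]
      exact ih keep

-- one BFS level of A: processing the depth-d segment leaves the depth-(d+1) queue
theorem pvLoopA_level (children : PySem.Dict String (List String)) (md : Int) (d : Int)
    (hd : d < md) (F : List String) :
    ∀ (keep : PySem.Set String) (G : List String),
    pvLoopA children md keep
        (F.map (fun n => (n, d)) ++ G.map (fun n => (n, d + 1)))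
      = pvLoopA children md (pvSeg keep F).1
          ((G ++ ((pvSeg keep F).2).flatMap (pvChildGet children)).map (fun n => (n, d + 1))) := by
  induction F with
  | nil => intro keep G; simp [pvSeg]
  | cons n F ih =>
    intro keep G
    simp only [List.map_cons, List.cons_append]
    rcases hc : PySem.Set.contains keep n with _ | _
    · rw [pvLoopA_cons_new children md keep n d _ hc, if_neg (by omega), pvSeg_cons_new hc]
      have hlist :
          (F.map (fun n => (n, d)) ++ G.map (fun n => (n, d + 1)))
              ++ (pvChildGet children n).map (fun c => (c, d + 1))
            = F.map (fun n => (n, d)) ++ (G ++ pvChildGet children n).map (fun n => (n, d + 1)) := by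
        simp [List.map_append]
      rw [hlist, ih (PySem.Set.add keep n) (G ++ pvChildGet children n)]
      simp [List.append_assoc]
    · rw [pvLoopA_cons_mem children md keep n d _ hc, pvSeg_cons_mem hc]
      exact ih keep G

-- A's whole BFS equals the level recursion pvLA
theorem pvLoopA_eq_pvLA (children : PySem.Dict String (List String)) (md : Int) :
    ∀ (k : Nat) (d : Int) (keep : PySem.Set String) (F : List String),
    (md - d).toNat = k →
    pvLoopA children md keep (F.map (fun n => (n, d))) = pvLA children keep F k := by
  intro k
  induction k with
  | zero =>
    intro d keep F hk
    have hd : md ≤ d := by omega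
    rw [pvLoopA_tail children md d hd F keep]
    rfl
  | succ k ih =>
    intro d keep F hk
    have hd : d < md := by omega
    have h0 : F.map (fun n => (n, d))
        = F.map (fun n => (n, d)) ++ ([] : List String).map (fun n => (n, d + 1)) := by simp
    rw [h0, pvLoopA_level children md d hd F keep [], List.nil_append]
    rw [ih (d + 1) (pvSeg keep F).1 (((pvSeg keep F).2).flatMap (pvChildGet children)) (by omega)]
    rfl

-- c is among children[p] iff (p, c) is an edge
theorem pv_mem_childGet_gen (edges : List (String × String)) :
    ∀ (d : PySem.Dict String (List String)) (p c : String),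
    c ∈ pvChildGet (edges.foldl (fun d pc => d.modify pc.1 [] (fun l => l ++ [pc.2])) d) p
      ↔ c ∈ pvChildGet d p ∨ (p, c) ∈ edges := by
  induction edges with
  | nil => intro d p c; simp
  | cons e rest ih =>
    obtain ⟨a, b⟩ := e
    intro d p c
    simp only [List.foldl_cons]
    rw [ih]
    unfold pvChildGet
    rw [PySem.Dict.getD_modify]
    by_cases hpe : p = a
    · subst hpe
      simp only [List.mem_append, List.mem_singleton, List.mem_cons,
        Prod.mk.injEq, true_and]
      rw [if_pos trivial]
      simp only [List.mem_append, List.mem_singleton]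
      tauto
    · simp only [if_neg hpe, List.mem_cons, Prod.mk.injEq]
      tauto

theorem pv_mem_childGet (edges : List (String × String)) (p c : String) :
    c ∈ pvChildGet (pvChildren edges) p ↔ (p, c) ∈ edges := by
  rw [pvChildren, pv_mem_childGet_gen edges PySem.Dict.empty p c]
  simp [pvChildGet, PySem.Dict.getD_empty]

theorem pvTrans_congr (edges : List (String × String)) {S T : String → Prop}
    (h : ∀ y, S y ↔ T y) (x : String) : pvTrans edges S x ↔ pvTrans edges T x := by
  unfold pvTrans
  constructor
  · rintro (hx | ⟨p, hp, he⟩)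
    · exact Or.inl ((h x).mp hx)
    · exact Or.inr ⟨p, (h p).mp hp, he⟩
  · rintro (hx | ⟨p, hp, he⟩)
    · exact Or.inl ((h x).mpr hx)
    · exact Or.inr ⟨p, (h p).mpr hp, he⟩

theorem pvSat_congr (edges : List (String × String)) (k : Nat) :
    ∀ {S T : String → Prop}, (∀ y, S y ↔ T y) → ∀ x, pvSat edges k S x ↔ pvSat edges k T x := by
  induction k with
  | zero => intro S T h x; exact h x
  | succ k ih => intro S T h x; exact ih (pvTrans_congr edges h) x

theorem pvSat_fixed (edges : List (String × String)) (k : Nat) {S : String → Prop}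
    (h : ∀ y, pvTrans edges S y ↔ S y) (x : String) : pvSat edges k S x ↔ S x := by
  induction k with
  | zero => exact Iff.rfl
  | succ k ih =>
    show pvSat edges k (pvTrans edges S) x ↔ S x
    exact (pvSat_congr edges k h x).trans ih

-- invariant for A: children of already-kept nodes are already kept or queued
def pvInv (edges : List (String × String)) (keep : PySem.Set String) (F : List String) : Prop :=
  ∀ p c, p ∈ keep → (p, c) ∈ edges → c ∈ keep ∨ c ∈ F

theorem mem_pvLA (edges : List (String × String)) (k : Nat) :
    ∀ (keep : PySem.Set String) (F : List String), pvInv edges keep F →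
    ∀ x, x ∈ pvLA (pvChildren edges) keep F k
      ↔ pvSat edges k (fun y => y ∈ keep ∨ y ∈ F) x := by
  induction k with
  | zero =>
    intro keep F _ x
    exact mem_pvSeg_fst F keep x
  | succ k ih =>
    intro keep F hInv x
    set K' := (pvSeg keep F).1 with hK
    set F' := ((pvSeg keep F).2).flatMap (pvChildGet (pvChildren edges)) with hF
    have hmemF' : ∀ y, y ∈ F' ↔ ∃ p, (p ∈ F ∧ p ∉ keep) ∧ (p, y) ∈ edges := by
      intro y
      rw [hF, List.mem_flatMap]
      constructor
      · rintro ⟨p, hp, hy⟩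
        exact ⟨p, (mem_pvSeg_snd F keep p).mp hp, (pv_mem_childGet edges p y).mp hy⟩
      · rintro ⟨p, hp, hy⟩
        exact ⟨p, (mem_pvSeg_snd F keep p).mpr hp, (pv_mem_childGet edges p y).mpr hy⟩
    have hInv' : pvInv edges K' F' := by
      intro p c hp he
      rcases (mem_pvSeg_fst F keep p).mp hp with hk | hf
      · rcases hInv p c hk he with h | h
        · exact Or.inl ((mem_pvSeg_fst F keep c).mpr (Or.inl h))
        · exact Or.inl ((mem_pvSeg_fst F keep c).mpr (Or.inr h))
      · by_cases hpk : p ∈ keep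
        · rcases hInv p c hpk he with h | h
          · exact Or.inl ((mem_pvSeg_fst F keep c).mpr (Or.inl h))
          · exact Or.inl ((mem_pvSeg_fst F keep c).mpr (Or.inr h))
        · exact Or.inr ((hmemF' c).mpr ⟨p, ⟨hf, hpk⟩, he⟩)
    have hset : ∀ y, (y ∈ K' ∨ y ∈ F') ↔ pvTrans edges (fun z => z ∈ keep ∨ z ∈ F) y := by
      intro y
      unfold pvTrans
      rw [mem_pvSeg_fst F keep y, hmemF' y]
      constructor
      · rintro (h | ⟨p, ⟨hpF, _⟩, he⟩)
        · exact Or.inl h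
        · exact Or.inr ⟨p, Or.inr hpF, he⟩
      · rintro (h | ⟨p, hp, he⟩)
        · exact Or.inl h
        · by_cases hpk : p ∈ keep
          · exact Or.inl (hInv p y hpk he)
          · rcases hp with h | h
            · exact absurd h hpk
            · exact Or.inr ⟨p, ⟨h, hpk⟩, he⟩
    show x ∈ pvLA (pvChildren edges) K' F' k ↔ pvSat edges k (pvTrans edges _) x
    rw [ih K' F' hInv' x]
    exact pvSat_congr edges k hset x

theorem mem_pvNewB (edges : List (String × String)) (keep : PySem.Set String) (x : String) :
    x ∈ pvNewB edges keep ↔ (∃ p, p ∈ keep ∧ (p, x) ∈ edges) ∧ x ∉ keep := by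
  unfold pvNewB
  rw [PySem.Set.mem_diff, PySem.Set.mem_ofList, List.mem_map]
  constructor
  · rintro ⟨⟨pc, hpc, rfl⟩, hnk⟩
    rcases List.mem_filter.mp hpc with ⟨he, hp⟩
    exact ⟨⟨pc.1, (PySem.Set.contains_iff _ _).mp hp, by cases pc; exact he⟩, hnk⟩
  · rintro ⟨⟨p, hp, he⟩, hnk⟩
    exact ⟨⟨(p, x), List.mem_filter.mpr ⟨he, (PySem.Set.contains_iff _ _).mpr hp⟩, rfl⟩, hnk⟩

theorem mem_pvLoopB (edges : List (String × String)) (k : Nat) :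
    ∀ (keep : PySem.Set String) (x : String),
    x ∈ pvLoopB edges keep k ↔ pvSat edges k (fun y => y ∈ keep) x := by
  induction k with
  | zero => intro keep x; exact Iff.rfl
  | succ k ih =>
    intro keep x
    show x ∈ (if (pvNewB edges keep).isEmpty then keep
              else pvLoopB edges (PySem.Set.union keep (pvNewB edges keep)) k)
        ↔ pvSat edges k (pvTrans edges _) x
    by_cases hE : (pvNewB edges keep).isEmpty = true
    · rw [if_pos hE]
      have hnil : pvNewB edges keep = [] := List.isEmpty_iff.mp hE
      have hfix : ∀ y, pvTrans edges (fun z => z ∈ keep) y ↔ y ∈ keep := by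
        intro y
        unfold pvTrans
        constructor
        · rintro (h | ⟨p, hp, he⟩)
          · exact h
          · by_cases hy : y ∈ keep
            · exact hy
            · have : y ∈ pvNewB edges keep := (mem_pvNewB edges keep y).mpr ⟨⟨p, hp, he⟩, hy⟩
              rw [hnil] at this
              cases this
        · exact Or.inl
      exact ((pvSat_congr edges k hfix x).trans (pvSat_fixed edges k hfix x)).symm
    · rw [if_neg hE]
      rw [ih (PySem.Set.union keep (pvNewB edges keep)) x]
      refine pvSat_congr edges k (fun y => ?_) x
      rw [PySem.Set.mem_union, mem_pvNewB]
      unfold pvTrans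
      constructor
      · rintro (h | ⟨⟨p, hp, he⟩, _⟩)
        · exact Or.inl h
        · exact Or.inr ⟨p, hp, he⟩
      · rintro (h | ⟨p, hp, he⟩)
        · exact Or.inl h
        · by_cases hy : y ∈ keep
          · exact Or.inl hy
          · exact Or.inr ⟨⟨p, hp, he⟩, hy⟩

theorem pv_keeps_mem_equal (edges : List (String × String)) (md : Int) (r : String) (x : String) :
    x ∈ pvLoopA (pvChildren edges) md PySem.Set.empty [(r, 0)]
      ↔ x ∈ pvLoopB edges (PySem.Set.add PySem.Set.empty r) md.toNat := by
  have hA0 : ([(r, (0 : Int))] : List (String × Int)) = [r].map (fun n => (n, (0 : Int))) := rfl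
  rw [hA0, pvLoopA_eq_pvLA (pvChildren edges) md md.toNat 0 PySem.Set.empty [r] (by omega)]
  have hInv0 : pvInv edges PySem.Set.empty [r] := by
    intro p c hp _
    cases hp
  rw [mem_pvLA edges md.toNat PySem.Set.empty [r] hInv0 x,
    mem_pvLoopB edges md.toNat (PySem.Set.add PySem.Set.empty r) x]
  refine pvSat_congr edges md.toNat (fun y => ?_) x
  simp [PySem.Set.mem_add, PySem.Set.empty]

-- ===== VERDICT (by name: the statement is the Claim_ definition above) =====
theorem prune_edges_by_depth_spec : Claim_equal_prune_edges_by_depth := by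
  intro edges root max_depth _
  unfold Spec_prune_edges_by_depth prune_edges_by_depth prune_edges_by_depth_alt
  cases root with
  | none => rfl
  | some r =>
    by_cases hr : r = ""
    · simp [hr]
    · simp only [hr, if_false]
      refine List.filter_congr (fun pc _ => ?_)
      congr 1 <;>
      · rw [Bool.eq_iff_iff, PySem.Set.contains_iff, PySem.Set.contains_iff]
        exact pv_keeps_mem_equal edges max_depth r _
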